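-- pv_equiv track=rewrite | github.com/sderev/toc-markdown | toc_markdown/parser.py | _leading_whitespace_columns
-- ===== SOURCE A (Python) =====
-- def _leading_whitespace_columns(line: str) -> int:
--     """Compute the column width of leading whitespace.
--
--     Tabs advance to the next multiple of four columns to match Markdown
--     indentation rules.
--
--     Args:
--         line: Line whose leading whitespace should be measured.
--
--     Returns:
--         int: Number of columns occupied by the leading whitespace.
--
--     Examples:
--         _leading_whitespace_columns("    text")  # 4
--         _leading_whitespace_columns("\ttext")  # 4
--     """
--     columns = 0
--     for character in line:
--         if character == " ":
--             columns += 1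
--             continue
--         if character == "\t":
--             columns += 4 - (columns % 4)
--             continue
--         break
--     return columns
-- ===== SOURCE B (Python) =====
-- def _leading_whitespace_columns(line: str) -> int:
--     prefix = line[: len(line) - len(line.lstrip(" \t"))]
--     return len(prefix.expandtabs(4))
-- ===== Notes on version B (the rewrite author's own statement) =====
-- stated objective: idiomatic
-- what changed: Replaces the manual early-breaking loop with running tab-stop arithmetic by extracting the whitespace prefix via lstrip/slicing and measuring it with str.expandtabs(4).
import Mathlib
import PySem

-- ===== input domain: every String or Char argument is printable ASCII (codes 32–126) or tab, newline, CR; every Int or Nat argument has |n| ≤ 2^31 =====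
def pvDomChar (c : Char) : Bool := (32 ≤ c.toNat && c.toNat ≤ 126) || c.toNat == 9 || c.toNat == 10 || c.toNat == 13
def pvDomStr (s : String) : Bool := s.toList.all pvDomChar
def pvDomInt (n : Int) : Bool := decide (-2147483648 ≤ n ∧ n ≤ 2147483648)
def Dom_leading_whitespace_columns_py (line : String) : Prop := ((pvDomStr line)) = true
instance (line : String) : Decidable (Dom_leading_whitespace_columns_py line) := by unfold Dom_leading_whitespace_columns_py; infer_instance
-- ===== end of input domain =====

-- B extracts the leading space/tab prefix with lstrip slicing and measures it via expandtabs(4) (idiomatic; same cost).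


-- ===== PORT A =====
-- A's loop: running column counter, tab advances to next multiple of 4, break at first other char.
def pvLoopA : List Char → Int → Int
  | [], columns => columns
  | c :: rest, columns =>
    if c = ' ' then pvLoopA rest (columns + 1)
    else if c = '\t' then pvLoopA rest (columns + (4 - PySem.Int.mod columns 4))
    else columns

def leading_whitespace_columns_py (line : String) : Int :=
  pvLoopA line.toList 0

-- ===== PORT B =====
-- line.lstrip(" \t")
def pvLstripSpTab : List Char → List Char
  | [] => []
  | c :: rest => if c = ' ' ∨ c = '\t' then pvLstripSpTab rest else c :: rest

-- str.expandtabs(4): exact on the stated ASCII domain (tab pads to the next multiple of 4,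
-- '\n'/'\r' reset the column, every other char advances the column by one).
def pvExpandTabs4 (cs : List Char) : List Char :=
  (cs.foldl (fun (st : List Char × Nat) c =>
     if c = '\t' then (st.1 ++ List.replicate (4 - st.2 % 4) ' ', st.2 + (4 - st.2 % 4))
     else if c = '\n' ∨ c = '\r' then (st.1 ++ [c], 0)
     else (st.1 ++ [c], st.2 + 1)) ([], 0)).1

def leading_whitespace_columns_py_alt (line : String) : Int :=
  let cs := line.toList
  let pre := cs.take (cs.length - (pvLstripSpTab cs).length)
  ((pvExpandTabs4 pre).length : Int)

-- ===== PRECONDITION & SPEC =====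
def Spec_leading_whitespace_columns_py (line : String) (out : Int) : Prop := out = leading_whitespace_columns_py_alt line
instance (line : String) (out : Int) : Decidable (Spec_leading_whitespace_columns_py line out) := by unfold Spec_leading_whitespace_columns_py; infer_instance

-- ===== CLAIM (what is proved, stated in full; the proofs are below) =====
def Claim_equal_leading_whitespace_columns_py : Prop := ∀ (line : String), Dom_leading_whitespace_columns_py line → Spec_leading_whitespace_columns_py line (leading_whitespace_columns_py line)

-- ===== LEMMAS AND PROOFS =====

def pvWsp (c : Char) : Bool := c = ' ' ∨ c = '\t'

theorem pvLstrip_eq_dropWhile (cs : List Char) : pvLstripSpTab cs = cs.dropWhile pvWsp := by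
  induction cs with
  | nil => rfl
  | cons c rest ih =>
    simp only [pvLstripSpTab, List.dropWhile, pvWsp]
    by_cases h : c = ' ' ∨ c = '\t' <;> simp [h, ih]

theorem pvPrefix_eq_takeWhile (cs : List Char) :
    cs.take (cs.length - (pvLstripSpTab cs).length) = cs.takeWhile pvWsp := by
  rw [pvLstrip_eq_dropWhile]
  have h : (cs.takeWhile pvWsp).length + (cs.dropWhile pvWsp).length = cs.length := by
    rw [← List.length_append, List.takeWhile_append_dropWhile]
  rw [← h, Nat.add_sub_cancel]
  rw [show cs.take (List.takeWhile pvWsp cs).length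
        = ((List.takeWhile pvWsp cs ++ List.dropWhile pvWsp cs)).take
            (List.takeWhile pvWsp cs).length from by
      rw [List.takeWhile_append_dropWhile]]
  rw [List.take_left]

theorem pvLoopA_takeWhile (cs : List Char) (n : Int) :
    pvLoopA cs n = pvLoopA (cs.takeWhile pvWsp) n := by
  induction cs generalizing n with
  | nil => rfl
  | cons c rest ih =>
    simp only [List.takeWhile, pvWsp]
    by_cases hs : c = ' '
    · simp [pvLoopA, hs, ih]
    · by_cases ht : c = '\t'
      · simp [pvLoopA, ht, ih]
      · simp [pvLoopA, hs, ht]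

theorem pvFold_inv (ws : List Char) (hws : ∀ c ∈ ws, pvWsp c) (acc : List Char) (n : Nat)
    (hlen : acc.length = n) :
    (ws.foldl (fun (st : List Char × Nat) c =>
       if c = '\t' then (st.1 ++ List.replicate (4 - st.2 % 4) ' ', st.2 + (4 - st.2 % 4))
       else if c = '\n' ∨ c = '\r' then (st.1 ++ [c], 0)
       else (st.1 ++ [c], st.2 + 1)) (acc, n)).1.length = (pvLoopA ws (n : Int)).toNat := by
  induction ws generalizing acc n with
  | nil => simpa [pvLoopA] using hlen
  | cons c rest ih =>
    have hc : pvWsp c = true := hws c (List.mem_cons_self ..)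
    have hrest : ∀ c ∈ rest, pvWsp c := fun x hx => hws x (List.mem_cons_of_mem _ hx)
    simp only [pvWsp, decide_eq_true_eq] at hc
    rcases hc with hc | hc
    · subst hc
      simp only [List.foldl_cons, if_neg (by decide : ¬(' ' = '\t')),
        if_neg (by simp : ¬(' ' = '\n' ∨ ' ' = '\r'))]
      rw [ih hrest (acc ++ [' ']) (n + 1) (by simp [hlen])]
      simp [pvLoopA]
    · subst hc
      simp only [List.foldl_cons, reduceIte]
      have hmod : PySem.Int.mod (n : Int) 4 = ((n % 4 : Nat) : Int) :=
        PySem.Int.mod_natCast n 4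
      have hk : ((n : Int) + (4 - PySem.Int.mod (n : Int) 4)) = ((n + (4 - n % 4) : Nat) : Int) := by
        rw [hmod]
        have : n % 4 < 4 := Nat.mod_lt _ (by omega)
        push_cast [Nat.le_of_lt this]
        ring
      rw [ih hrest (acc ++ List.replicate (4 - n % 4) ' ') (n + (4 - n % 4)) (by simp [hlen])]
      simp only [pvLoopA, if_neg (by decide : ¬('\t' = ' ')), hk, reduceIte]

theorem pvLoopA_nonneg (ws : List Char) (n : Int) (hn : 0 ≤ n) : 0 ≤ pvLoopA ws n := by
  induction ws generalizing n with
  | nil => simpa [pvLoopA]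
  | cons c rest ih =>
    simp only [pvLoopA]
    split_ifs with hs ht
    · exact ih _ (by omega)
    · refine ih _ ?_
      have := PySem.Int.mod_lt (a := n) (b := 4) (by omega)
      omega
    · exact hn

-- ===== VERDICT (by name: the statement is the Claim_ definition above) =====
theorem leading_whitespace_columns_py_spec : Claim_equal_leading_whitespace_columns_py := by
  intro line _
  unfold Spec_leading_whitespace_columns_py
  unfold leading_whitespace_columns_py leading_whitespace_columns_py_alt pvExpandTabs4
  simp only [pvPrefix_eq_takeWhile]
  rw [pvFold_inv (line.toList.takeWhile pvWsp)
        (fun c hc => (List.mem_takeWhile_imp hc)) [] 0 rfl]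
  rw [pvLoopA_takeWhile]
  have := pvLoopA_nonneg (line.toList.takeWhile pvWsp) 0 le_rfl
  simp only [Nat.cast_zero]
  omega
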